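-- pv_equiv track=rewrite | github.com/parasiitism/AlgoDaily | leetcode/2219-maximum-sum-score-of-array/main.py | maximumSumScore
-- ===== SOURCE A (Python) =====
-- from typing import List
--
-- def maximumSumScore(nums: List[int]) -> int:
--     sfs = sum(nums)
--     n = len(nums)
--     pfs = 0
--     res = -(2**32)
--     for i in range(n):
--         x = nums[i]
--         pfs += x
--         res = max(res, pfs, sfs)
--         sfs -= x
--     return res
-- ===== SOURCE B (Python) =====
-- from typing import List
--
-- def maximumSumScore(nums: List[int]) -> int:
--     pre = []
--     s = 0
--     for x in nums:
--         s += x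
--         pre.append(s)
--     suf = []
--     s = 0
--     for x in reversed(nums):
--         s += x
--         suf.append(s)
--     return max([-(2**32)] + pre + suf)
-- ===== Notes on version B (the rewrite author's own statement) =====
-- stated objective: simpler
-- what changed: Replaces A's single incremental pass maintaining three interleaved state variables (prefix sum, suffix sum, running max) with an explicit decomposition: build the prefix-sum table and the suffix-sum table (via reversed iteration), then take one max over both tables with the -(2**32) sentinel.
import Mathlib
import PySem

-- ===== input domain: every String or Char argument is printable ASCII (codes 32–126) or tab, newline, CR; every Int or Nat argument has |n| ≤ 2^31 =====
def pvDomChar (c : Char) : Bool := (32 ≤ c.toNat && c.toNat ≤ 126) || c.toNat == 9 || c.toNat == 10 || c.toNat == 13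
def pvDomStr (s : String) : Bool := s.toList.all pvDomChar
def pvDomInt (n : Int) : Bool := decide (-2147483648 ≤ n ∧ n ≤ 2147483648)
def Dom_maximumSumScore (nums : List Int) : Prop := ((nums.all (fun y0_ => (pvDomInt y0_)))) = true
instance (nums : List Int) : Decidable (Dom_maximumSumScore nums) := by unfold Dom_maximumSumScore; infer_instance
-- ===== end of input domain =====

-- B builds the prefix- and suffix-sum tables explicitly and takes one max over both
-- (plus the -(2**32) sentinel), instead of A's single pass with three state variables.

-- ===== PORT A =====
-- A's loop: state (pfs, sfs, res), one step per element.
def pvGoA : Int → Int → Int → List Int → Int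
  | _, _, res, [] => res
  | pfs, sfs, res, x :: xs => pvGoA (pfs + x) (sfs - x) (max (max res (pfs + x)) sfs) xs

def maximumSumScore (nums : List Int) : Int :=
  pvGoA 0 nums.sum (-(2 ^ 32)) nums

-- ===== PORT B =====
-- running-sum table builder: acc s xs = the list of partial sums s+x0, s+x0+x1, …
def pvAcc : Int → List Int → List Int
  | _, [] => []
  | s, x :: xs => (s + x) :: pvAcc (s + x) xs

def maximumSumScore_alt (nums : List Int) : Int :=
  let pre := pvAcc 0 nums
  let suf := pvAcc 0 nums.reverse
  List.foldl max (-(2 ^ 32)) (pre ++ suf)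

-- ===== PRECONDITION & SPEC =====
def Spec_maximumSumScore (nums : List Int) (out : Int) : Prop := out = maximumSumScore_alt nums
instance (nums : List Int) (out : Int) : Decidable (Spec_maximumSumScore nums out) := by unfold Spec_maximumSumScore; infer_instance

-- ===== CLAIM (what is proved, stated in full; the proofs are below) =====
def Claim_equal_maximumSumScore : Prop := ∀ (nums : List Int), Dom_maximumSumScore nums → Spec_maximumSumScore nums (maximumSumScore nums)

-- ===== LEMMAS AND PROOFS =====

-- the interleaved list of values A's loop maxes over
def pvMix : Int → Int → List Int → List Int
  | _, _, [] => []
  | pfs, sfs, x :: xs => (pfs + x) :: sfs :: pvMix (pfs + x) (sfs - x) xs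

-- the list of suffix-sum values A consumes
def pvSf : Int → List Int → List Int
  | _, [] => []
  | s, x :: xs => s :: pvSf (s - x) xs

theorem pvGoA_foldl (xs : List Int) : ∀ pfs sfs res,
    pvGoA pfs sfs res xs = List.foldl max res (pvMix pfs sfs xs) := by
  induction xs with
  | nil => intro _ _ _; rfl
  | cons x xs ih => intro pfs sfs res; simp [pvGoA, pvMix, List.foldl, ih]

theorem pvMix_perm (xs : List Int) : ∀ pfs sfs,
    (pvMix pfs sfs xs).Perm (pvAcc pfs xs ++ pvSf sfs xs) := by
  induction xs with
  | nil => intro _ _; simp [pvMix, pvAcc, pvSf]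
  | cons x xs ih =>
    intro pfs sfs
    simp only [pvMix, pvAcc, pvSf]
    refine List.Perm.cons _ ?_
    exact ((ih (pfs + x) (sfs - x)).cons sfs).trans List.perm_middle.symm

theorem pvAcc_append (l : List Int) : ∀ a x,
    pvAcc a (l ++ [x]) = pvAcc a l ++ [a + l.sum + x] := by
  induction l with
  | nil => intro a x; simp [pvAcc]
  | cons y l ih =>
    intro a x
    simp [pvAcc, ih, List.sum_cons]
    ring_nf

theorem pvSf_eq_rev (xs : List Int) :
    pvAcc 0 xs.reverse = (pvSf xs.sum xs).reverse := by
  induction xs with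
  | nil => rfl
  | cons x xs ih =>
    rw [List.reverse_cons, pvAcc_append, ih]
    simp [pvSf, List.sum_cons]
    omega

theorem maximumSumScore_spec : Claim_equal_maximumSumScore := by
  intro nums _
  show maximumSumScore nums = maximumSumScore_alt nums
  unfold maximumSumScore maximumSumScore_alt
  rw [pvGoA_foldl]
  have h1 : (pvMix 0 nums.sum nums).Perm (pvAcc 0 nums ++ pvAcc 0 nums.reverse) := by
    refine (pvMix_perm nums 0 nums.sum).trans ?_
    rw [pvSf_eq_rev]
    exact List.Perm.append_left _ (pvSf nums.sum nums).reverse_perm.symm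
  exact h1.foldl_eq _
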